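-- pv_equiv track=rewrite | github.com/AyayaXiaowang/Ayaya_Miliastra_Editor | engine/validate/graph_validation_quickfixes.py | _find_graph_variables_insert_line
-- ===== SOURCE A (Python) =====
-- from typing import Dict, Iterable, List, Mapping, Sequence, Set, Tuple
--
-- def _find_graph_variables_insert_line(lines: Sequence[str]) -> int:
--     """返回应插入 GRAPH_VARIABLES 块的行索引（0-based，插入点）。"""
--     # 优先：插在 prelude import 之后
--     for idx, line in enumerate(lines):
--         stripped = line.strip()
--         if stripped.startswith("from app.runtime.engine.graph_prelude_") and "import *" in stripped:
--             return idx + 1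
--     # 回退：插在第一个 class 定义之前
--     for idx, line in enumerate(lines):
--         if line.startswith("class "):
--             return idx
--     return 0
-- ===== SOURCE B (Python) =====
-- def _find_graph_variables_insert_line(lines):
--     """Single pass: return right after a prelude import if found; otherwise
--     remember the first 'class ' line index and fall back to it (or 0)."""
--     first_class = None
--     for idx, line in enumerate(lines):
--         stripped = line.strip()
--         if stripped.startswith("from app.runtime.engine.graph_prelude_") and "import *" in stripped:
--             return idx + 1
--         if first_class is None and line.startswith("class "):
--             first_class = idx
--     return first_class if first_class is not None else 0
-- ===== Notes on version B (the rewrite author's own statement) =====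
-- stated objective: simpler
-- what changed: Replaces A's two sequential enumerate loops with one single pass that returns immediately after a prelude import and otherwise remembers the first 'class ' line index as a fallback.
import Mathlib
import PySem

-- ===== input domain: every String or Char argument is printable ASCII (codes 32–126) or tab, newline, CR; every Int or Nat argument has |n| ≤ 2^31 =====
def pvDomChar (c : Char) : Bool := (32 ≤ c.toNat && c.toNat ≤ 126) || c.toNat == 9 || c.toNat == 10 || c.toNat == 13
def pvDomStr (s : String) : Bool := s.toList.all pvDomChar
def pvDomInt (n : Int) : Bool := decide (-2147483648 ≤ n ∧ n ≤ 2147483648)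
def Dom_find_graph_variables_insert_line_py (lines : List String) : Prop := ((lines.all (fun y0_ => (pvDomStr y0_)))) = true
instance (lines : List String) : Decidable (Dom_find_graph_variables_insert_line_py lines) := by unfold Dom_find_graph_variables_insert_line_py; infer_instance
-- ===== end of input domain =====

-- B merges A's two scans into one pass that records the first 'class ' index while
-- still letting a later prelude import win (objective: simpler).

-- the prelude-import test (on the stripped line), shared verbatim by both Pythons
def pvIsPrelude (line : String) : Bool :=
  let stripped := PySem.Str.strip line
  PySem.Str.startswith stripped "from app.runtime.engine.graph_prelude_" &&
    PySem.Str.isIn "import *" stripped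

-- ===== PORT A =====
-- first loop: 'for idx, line in enumerate(lines): … return idx + 1'
def pvALoop1 (lines : List String) (idx : Int) : Option Int :=
  match lines with
  | [] => none
  | l :: rest => if pvIsPrelude l then some (idx + 1) else pvALoop1 rest (idx + 1)

-- second loop: 'for idx, line in enumerate(lines): if line.startswith("class "): return idx'
def pvALoop2 (lines : List String) (idx : Int) : Option Int :=
  match lines with
  | [] => none
  | l :: rest => if PySem.Str.startswith l "class " then some idx else pvALoop2 rest (idx + 1)

def find_graph_variables_insert_line_py (lines : List String) : Int :=
  match pvALoop1 lines 0 with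
  | some r => r
  | none =>
    match pvALoop2 lines 0 with
    | some r => r
    | none => 0

-- ===== PORT B =====
-- single pass with the first-class accumulator (Source B's loop)
def pvBLoop (lines : List String) (idx : Int) (firstClass : Option Int) : Int :=
  match lines with
  | [] => match firstClass with
          | some i => i
          | none => 0
  | l :: rest =>
    if pvIsPrelude l then idx + 1
    else
      pvBLoop rest (idx + 1)
        (if firstClass.isNone && PySem.Str.startswith l "class " then some idx else firstClass)

def find_graph_variables_insert_line_py_alt (lines : List String) : Int :=
  pvBLoop lines 0 none

-- ===== PRECONDITION & SPEC =====
def Spec_find_graph_variables_insert_line_py (lines : List String) (out : Int) : Prop := out = find_graph_variables_insert_line_py_alt lines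
instance (lines : List String) (out : Int) : Decidable (Spec_find_graph_variables_insert_line_py lines out) := by unfold Spec_find_graph_variables_insert_line_py; infer_instance

-- ===== CLAIM (what is proved, stated in full; the proofs are below) =====
def Claim_equal_find_graph_variables_insert_line_py : Prop := ∀ (lines : List String), Dom_find_graph_variables_insert_line_py lines → Spec_find_graph_variables_insert_line_py lines (find_graph_variables_insert_line_py lines)

-- ===== LEMMAS AND PROOFS =====

-- B's single loop equals: prelude result if any, else the recorded/first class index, else 0.
theorem pvBLoop_eq (lines : List String) :
    ∀ (idx : Int) (fc : Option Int),
      pvBLoop lines idx fc =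
        match pvALoop1 lines idx with
        | some r => r
        | none =>
          match fc with
          | some i => i
          | none =>
            match pvALoop2 lines idx with
            | some r => r
            | none => 0 := by
  induction lines with
  | nil => intro idx fc; cases fc <;> rfl
  | cons l rest ih =>
    intro idx fc
    simp only [pvBLoop, pvALoop1, pvALoop2]
    by_cases hp : pvIsPrelude l
    · simp [hp]
    · simp only [hp, if_false]
      rw [ih]
      cases fc with
      | some i => simp
      | none =>
        by_cases hc : PySem.Str.startswith l "class "
        · simp only [Option.isNone_none, Bool.true_and, hc, if_true]
          cases pvALoop1 rest (idx + 1) <;> rfl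
        · simp only [Option.isNone_none, Bool.true_and, hc, if_false]
          cases pvALoop1 rest (idx + 1) <;> rfl

-- ===== VERDICT (by name: the statement is the Claim_ definition above) =====
theorem find_graph_variables_insert_line_py_spec : Claim_equal_find_graph_variables_insert_line_py := by
  intro lines _
  unfold Spec_find_graph_variables_insert_line_py find_graph_variables_insert_line_py find_graph_variables_insert_line_py_alt
  rw [pvBLoop_eq]
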